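-- pv_equiv track=rewrite | github.com/viveksharma3831-dot/Library_mangement | utils.py | calculate_fine
-- ===== SOURCE A (Python) =====
-- def calculate_fine(late_days):
--     fine = 0
--     for day in range(1, late_days + 1):
--         week = ((day - 1) // 7) + 1
--         rate = 10
--         for number in range(2, week + 1):
--             rate = rate * number
--         fine = fine + rate
--     return fine
-- ===== SOURCE B (Python) =====
-- def calculate_fine(late_days):
--     if late_days <= 0:
--         return 0
--     weeks = (late_days + 6) // 7
--     fine = 0
--     rate = 10
--     for w in range(1, weeks):
--         fine += rate * 7
--         rate *= (w + 1)
--     return fine + rate * (late_days - 7 * (weeks - 1))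
-- ===== Notes on version B (the rewrite author's own statement) =====
-- stated objective: faster
-- what changed: B replaces A's per-day loop that recomputes the week's factorial rate from scratch for every day with a single loop over weeks that carries the rate incrementally and multiplies it by the number of days in each week.
import Mathlib
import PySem

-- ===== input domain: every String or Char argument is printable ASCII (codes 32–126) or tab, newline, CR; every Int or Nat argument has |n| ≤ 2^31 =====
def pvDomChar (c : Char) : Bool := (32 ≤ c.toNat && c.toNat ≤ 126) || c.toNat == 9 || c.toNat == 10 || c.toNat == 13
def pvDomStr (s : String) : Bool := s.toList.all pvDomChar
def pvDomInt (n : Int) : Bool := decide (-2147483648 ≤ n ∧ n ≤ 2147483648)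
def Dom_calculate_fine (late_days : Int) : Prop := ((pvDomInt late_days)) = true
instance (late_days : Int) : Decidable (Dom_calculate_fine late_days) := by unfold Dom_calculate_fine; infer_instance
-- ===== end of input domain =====

-- B replaces A's per-day loop with its factorial recomputed from scratch (O(n^2/7) multiplications)
-- by a single loop over weeks carrying the rate incrementally (O(n/7)); objective: faster (asymptotic).

-- ===== PORT A =====
def calculate_fine (late_days : Int) : Int :=
  (PySem.List.pyRange 1 (late_days + 1) 1).foldl
    (fun fine day =>
      let week := PySem.Int.floordiv (day - 1) 7 + 1
      let rate := (PySem.List.pyRange 2 (week + 1) 1).foldl (fun rate number => rate * number) 10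
      fine + rate) 0

-- ===== PORT B =====
def calculate_fine_alt (late_days : Int) : Int :=
  if late_days ≤ 0 then 0
  else
    let weeks := PySem.Int.floordiv (late_days + 6) 7
    let p := (PySem.List.pyRange 1 weeks 1).foldl
      (fun (p : Int × Int) w => (p.1 + p.2 * 7, p.2 * (w + 1))) (0, 10)
    p.1 + p.2 * (late_days - 7 * (weeks - 1))

-- ===== PRECONDITION & SPEC =====
def Spec_calculate_fine (late_days : Int) (out : Int) : Prop := out = calculate_fine_alt late_days
instance (late_days : Int) (out : Int) : Decidable (Spec_calculate_fine late_days out) := by unfold Spec_calculate_fine; infer_instance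

-- ===== CLAIM (what is proved, stated in full; the proofs are below) =====
def Claim_equal_calculate_fine : Prop := ∀ (late_days : Int), Dom_calculate_fine late_days → Spec_calculate_fine late_days (calculate_fine late_days)

-- ===== LEMMAS AND PROOFS =====

-- A's inner loop computes 10 * week!
lemma innerRate_eq (w : Nat) :
    (PySem.List.pyRange 2 ((w : Int) + 1) 1).foldl (fun rate number => rate * number) 10
      = 10 * (Nat.factorial w : Int) := by
  induction w with
  | zero => decide
  | succ m ih =>
    rcases Nat.eq_zero_or_pos m with hm | hm
    · subst hm; decide
    · have h2 : (2 : Int) ≤ (m : Int) + 1 := by exact_mod_cast Nat.succ_le_succ hm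
      have : PySem.List.pyRange 2 ((m : Int) + 1 + 1) 1
          = PySem.List.pyRange 2 ((m : Int) + 1) 1 ++ [(m : Int) + 1] :=
        PySem.List.pyRange_one_succ_right h2
      push_cast
      rw [show ((m : Int) + 1 + 1) = ((m : Int) + 1) + 1 by ring, this,
        List.foldl_append, ih]
      simp [Nat.factorial_succ]
      ring

-- B's weeks-loop as a function of the week count (proof-side name for B's fold)
def bpair (w : Nat) : Int × Int :=
  (PySem.List.pyRange 1 (w : Int) 1).foldl
    (fun (p : Int × Int) wk => (p.1 + p.2 * 7, p.2 * (wk + 1))) (0, 10)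

-- the rate component of B's fold after the weeks-loop is 10 * weeks!
lemma bpair_snd (w : Nat) : (bpair w).2 = 10 * (Nat.factorial w : Int) := by
  induction w with
  | zero => decide
  | succ m ih =>
    rcases Nat.eq_zero_or_pos m with hm | hm
    · subst hm; decide
    · have h1 : (1 : Int) ≤ (m : Int) := by exact_mod_cast hm
      unfold bpair at ih ⊢
      push_cast
      rw [PySem.List.pyRange_one_succ_right h1, List.foldl_append]
      simp [ih, Nat.factorial_succ]
      ring

-- B's fold at weeks w+1 in terms of the fold at w  (w ≥ 1)
lemma bpair_succ (w : Nat) (hw : 1 ≤ w) :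
    bpair (w + 1) = ((bpair w).1 + (bpair w).2 * 7, (bpair w).2 * ((w : Int) + 1)) := by
  have h1 : (1 : Int) ≤ (w : Int) := by exact_mod_cast hw
  unfold bpair
  push_cast
  rw [PySem.List.pyRange_one_succ_right h1, List.foldl_append]
  simp

-- B on a positive input, written with bpair
lemma altB_pos (m : Nat) (hm : 1 ≤ m) :
    calculate_fine_alt (m : Int)
      = (bpair ((m + 6) / 7)).1
        + (bpair ((m + 6) / 7)).2 * ((m : Int) - 7 * ((((m + 6) / 7 : Nat) : Int) - 1)) := by
  unfold calculate_fine_alt bpair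
  have h0 : ¬ ((m : Int) ≤ 0) := by omega
  rw [if_neg h0]
  have hf : PySem.Int.floordiv ((m : Int) + 6) 7 = (((m + 6) / 7 : Nat) : Int) := by
    rw [show ((m : Int) + 6) = ((m + 6 : Nat) : Int) by push_cast; ring]
    exact_mod_cast PySem.Int.floordiv_natCast (m + 6) 7
  rw [hf]

-- A's delta: one more day adds 10 * ((n / 7) + 1)!
lemma calcA_succ (n : Nat) :
    calculate_fine ((n : Int) + 1)
      = calculate_fine (n : Int) + 10 * (Nat.factorial (n / 7 + 1) : Int) := by
  unfold calculate_fine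
  have h1 : (1 : Int) ≤ (n : Int) + 1 := by omega
  rw [show ((n : Int) + 1 + 1) = ((n : Int) + 1) + 1 by ring,
    PySem.List.pyRange_one_succ_right h1, List.foldl_append]
  simp only [List.foldl_cons, List.foldl_nil]
  have hfd : PySem.Int.floordiv ((n : Int) + 1 - 1) 7 = ((n / 7 : Nat) : Int) := by
    rw [show ((n : Int) + 1 - 1) = (n : Int) by ring]
    exact_mod_cast PySem.Int.floordiv_natCast n 7
  rw [hfd, show ((n / 7 : Nat) : Int) + 1 = (((n / 7 + 1 : Nat) : Int)) by push_cast; ring,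
    innerRate_eq (n / 7 + 1)]

-- B's delta, same increment
lemma calcB_succ (n : Nat) :
    calculate_fine_alt ((n : Int) + 1)
      = calculate_fine_alt (n : Int) + 10 * (Nat.factorial (n / 7 + 1) : Int) := by
  rcases Nat.eq_zero_or_pos n with hn | hn
  · subst hn; decide
  · rw [show ((n : Int) + 1) = ((n + 1 : Nat) : Int) by push_cast; ring,
      altB_pos (n + 1) (by omega), altB_pos n hn]
    by_cases h7 : n % 7 = 0
    · -- a new week starts at day n + 1
      have hq1 : 1 ≤ n / 7 := by omega
      have hw1 : (n + 1 + 6) / 7 = n / 7 + 1 := by omega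
      have hw : (n + 6) / 7 = n / 7 := by omega
      have hni : (n : Int) = 7 * ((n / 7 : Nat) : Int) := by
        have := Nat.div_mul_cancel (Nat.dvd_of_mod_eq_zero h7)
        omega
      rw [hw1, hw, bpair_succ (n / 7) hq1, bpair_snd (n / 7)]
      have hfact : ((Nat.factorial (n / 7 + 1) : Nat) : Int)
          = (Nat.factorial (n / 7) : Int) * (((n / 7 : Nat) : Int) + 1) := by
        push_cast [Nat.factorial_succ]; ring
      rw [hfact]
      push_cast at hni hfact ⊢
      linear_combination (10 * ((n / 7).factorial : Int) * ((n : Int) / 7)) * hni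
    · -- same week: the week count is unchanged
      have hw1 : (n + 1 + 6) / 7 = (n + 6) / 7 := by omega
      have hw : (n + 6) / 7 = n / 7 + 1 := by omega
      rw [hw1, hw, bpair_snd (n / 7 + 1)]
      push_cast
      ring

-- A = B on the naturals
lemma calc_eq_nat (n : Nat) : calculate_fine (n : Int) = calculate_fine_alt (n : Int) := by
  induction n with
  | zero => decide
  | succ m ih =>
    push_cast
    rw [calcA_succ m, calcB_succ m, ih]

-- ===== VERDICT (by name: the statement is the Claim_ definition above) =====
theorem calculate_fine_spec : Claim_equal_calculate_fine := by
  intro ld _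
  unfold Spec_calculate_fine
  by_cases h : ld ≤ 0
  · unfold calculate_fine calculate_fine_alt
    rw [PySem.List.pyRange_one_eq_nil (by omega)]
    simp [h]
  · have : ld = (ld.toNat : Int) := by omega
    rw [this]
    exact calc_eq_nat ld.toNat
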